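-- pv_equiv track=rewrite | github.com/OliverLee123/PassengerMobilityProfiling | tools.py | TransferToFPTrip
-- ===== SOURCE A (Python) =====
-- def TransferToFPTrip(trip, fps):
--     '''
--     Judge if a trip contains fp and transfer to fp trip
--     Consider only 2 length fp temporarily
--     If a trip contains fp,then transfer to fp; else ratain the whole raw trip
--     '''
--     fpTrip = []
--     ifTrans = True
--     for fp in fps:
--         for i in range(len(trip)-1):
--             if(trip[i]==fp[0] and trip[i+1]==fp[1]):
--                 for f in fp:
--                     fpTrip.append(f)
--     if(len(fpTrip)>0):
--         return fpTrip, ifTrans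
--     else:
--         ifTrans = False
--         return trip, ifTrans
-- ===== SOURCE B (Python) =====
-- def TransferToFPTrip(trip, fps):
--     '''B: index trip's consecutive pairs in a dict once, then emit each fp
--     repeated by its pair count (one pass over trip instead of one per fp).'''
--     if len(trip) < 2:
--         return trip, False
--     counts = {}
--     for pair in zip(trip, trip[1:]):
--         counts[pair] = counts.get(pair, 0) + 1
--     fpTrip = []
--     for fp in fps:
--         fpTrip += fp * counts.get((fp[0], fp[1]), 0)
--     if fpTrip:
--         return fpTrip, True
--     return trip, False
-- ===== Notes on version B (the rewrite author's own statement) =====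
-- stated objective: alternative
-- what changed: B builds a dict counting trip's consecutive pairs in one pass and emits each fp repeated by its pair count, instead of A's rescan of the whole trip for every fp (intended as faster; measured 1.59x at n=4096, unconfirmed at the largest size).
-- outside the precondition, e.g. on TransferToFPTrip([0, 1, 0, -2, 3], [[107], [9, 8, 2]]): A returns ([0, 1, 0, -2, 3], False), B raises IndexError
import Mathlib
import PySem

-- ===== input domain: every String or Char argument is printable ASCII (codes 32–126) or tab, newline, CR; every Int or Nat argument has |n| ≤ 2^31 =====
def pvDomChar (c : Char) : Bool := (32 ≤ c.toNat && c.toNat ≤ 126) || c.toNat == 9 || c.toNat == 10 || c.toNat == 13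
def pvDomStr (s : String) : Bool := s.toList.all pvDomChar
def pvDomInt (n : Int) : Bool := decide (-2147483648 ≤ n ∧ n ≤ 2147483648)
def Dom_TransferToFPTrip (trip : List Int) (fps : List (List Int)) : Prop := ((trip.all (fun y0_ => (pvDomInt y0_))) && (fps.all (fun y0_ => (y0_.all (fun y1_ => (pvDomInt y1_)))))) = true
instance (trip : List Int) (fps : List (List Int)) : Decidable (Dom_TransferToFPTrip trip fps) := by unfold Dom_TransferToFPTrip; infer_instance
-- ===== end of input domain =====

-- B replaces A's per-fp rescan of the whole trip by a one-pass dict of consecutive-pair counts (objective: alternative).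


-- ===== PORT A =====
-- Port of A: for each fp, scan every consecutive position of trip; on a match append all of fp.
-- trip[i]/trip[i+1]/fp[0]/fp[1] via pyGetD (exact: under Pre_ every such access is in range).
def TransferToFPTrip (trip : List Int) (fps : List (List Int)) : List Int × Bool :=
  let fpTrip := fps.foldl (fun acc fp =>
    (PySem.List.pyRange 0 ((trip.length : Int) - 1) 1).foldl (fun acc2 i =>
      if PySem.List.pyGetD trip i 0 = PySem.List.pyGetD fp 0 0 ∧
         PySem.List.pyGetD trip (i + 1) 0 = PySem.List.pyGetD fp 1 0 then
        acc2 ++ fp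
      else acc2) acc) []
  if fpTrip.length > 0 then (fpTrip, true) else (trip, false)

-- ===== PORT B =====
-- Port of B: count consecutive pairs into a dict in one pass (trip[1:] = trip.drop 1, exact),
-- then emit fp * count per fp (fp * n = PySem.List.pyRepeat).
def TransferToFPTrip_alt (trip : List Int) (fps : List (List Int)) : List Int × Bool :=
  if trip.length < 2 then (trip, false)
  else
    let counts := (trip.zip (trip.drop 1)).foldl
      (fun d p => d.insert p (d.getD p 0 + 1)) PySem.Dict.empty
    let fpTrip := fps.foldl (fun acc fp =>
      acc ++ PySem.List.pyRepeat fp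
        (counts.getD (PySem.List.pyGetD fp 0 0, PySem.List.pyGetD fp 1 0) 0)) []
    if fpTrip.length > 0 then (fpTrip, true) else (trip, false)

-- ===== PRECONDITION & SPEC =====
-- Pre_ excludes the inputs where trip has a consecutive pair and some fp is shorter than 2:
-- there A raises IndexError on fp[0]/fp[1] (except when `and` short-circuits past fp[1], where A
-- still returns) and B itself raises IndexError building the lookup key (fp[0], fp[1]).
def Pre_TransferToFPTrip (trip : List Int) (fps : List (List Int)) : Prop :=
  2 ≤ trip.length → ∀ fp ∈ fps, 2 ≤ fp.length
instance (trip : List Int) (fps : List (List Int)) : Decidable (Pre_TransferToFPTrip trip fps) := by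
  unfold Pre_TransferToFPTrip; infer_instance
def pvWitness_TransferToFPTrip : List Int × List (List Int) := ([1, 2, 3], [[2, 3], [1, 3]])

def Spec_TransferToFPTrip (trip : List Int) (fps : List (List Int)) (out : List Int × Bool) : Prop := out = TransferToFPTrip_alt trip fps
instance (trip : List Int) (fps : List (List Int)) (out : List Int × Bool) : Decidable (Spec_TransferToFPTrip trip fps out) := by unfold Spec_TransferToFPTrip; infer_instance

-- ===== CLAIM (what is proved, stated in full; the proofs are below) =====
def Claim_equal_TransferToFPTrip : Prop := ∀ (trip : List Int) (fps : List (List Int)), Dom_TransferToFPTrip trip fps → Pre_TransferToFPTrip trip fps → Spec_TransferToFPTrip trip fps (TransferToFPTrip trip fps)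

-- ===== LEMMAS AND PROOFS =====

-- the list of consecutive pairs of trip, as B builds it
def pvPairs (trip : List Int) : List (Int × Int) := trip.zip (trip.drop 1)

-- a loop appending fp once per occurrence of key appends fp (count key) times
theorem pv_loop_count (l : List (Int × Int)) (fp : List Int) (key : Int × Int) (acc : List Int) :
    l.foldl (fun a x => if x = key then a ++ fp else a) acc
      = acc ++ PySem.List.pyRepeat fp (l.count key) := by
  induction l generalizing acc with
  | nil => simp [PySem.List.pyRepeat]
  | cons x xs ih =>
    by_cases h : x = key
    · subst h
      simp only [List.foldl_cons, ih, List.count_cons_self]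
      simp [PySem.List.pyRepeat, List.replicate_succ, List.append_assoc]
    · simp [List.foldl_cons, h, ih, List.count_cons_of_ne]

-- the pair list, elementwise
theorem pv_pairs_map (trip : List Int) :
    (List.range (trip.length - 1)).map
        (fun k => (trip.getD k 0, trip.getD (k + 1) 0)) = pvPairs trip := by
  apply List.ext_getElem
  · simp [pvPairs]
  · intro k h1 h2
    have hlen : k + 1 < trip.length := by
      simp [pvPairs] at h2; omega
    simp only [pvPairs, List.getElem_map, List.getElem_range, List.getElem_zip,
      List.getElem_drop]
    rw [Prod.mk.injEq]
    refine ⟨?_, ?_⟩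
    · rw [List.getD_eq_getElem?_getD, List.getElem?_eq_getElem (by omega)]; simp
    · rw [List.getD_eq_getElem?_getD, List.getElem?_eq_getElem (by omega)]
      simp [Nat.add_comm]

-- A's inner index loop over range(len(trip)-1) equals appending fp (pair count) times
theorem pv_inner (trip fp : List Int) (acc : List Int) :
    (PySem.List.pyRange 0 ((trip.length : Int) - 1) 1).foldl (fun acc2 i =>
      if PySem.List.pyGetD trip i 0 = PySem.List.pyGetD fp 0 0 ∧
         PySem.List.pyGetD trip (i + 1) 0 = PySem.List.pyGetD fp 1 0 then
        acc2 ++ fp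
      else acc2) acc
      = acc ++ PySem.List.pyRepeat fp
          ((pvPairs trip).count (PySem.List.pyGetD fp 0 0, PySem.List.pyGetD fp 1 0)) := by
  rw [PySem.List.pyRange_one, List.foldl_map]
  have hbody : ∀ (a : List Int) (k : Nat), k ∈ List.range (((trip.length : Int) - 1 - 0).toNat) →
      (if PySem.List.pyGetD trip ((0 : Int) + k) 0 = PySem.List.pyGetD fp 0 0 ∧
          PySem.List.pyGetD trip ((0 : Int) + k + 1) 0 = PySem.List.pyGetD fp 1 0 then
        a ++ fp else a)
      = (if (trip.getD k 0, trip.getD (k + 1) 0)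
            = (PySem.List.pyGetD fp 0 0, PySem.List.pyGetD fp 1 0) then a ++ fp else a) := by
    intro a k _
    have h1 : PySem.List.pyGetD trip ((0 : Int) + k) 0 = trip.getD k 0 := by
      rw [zero_add, PySem.List.pyGetD_natCast]
    have h2 : PySem.List.pyGetD trip ((0 : Int) + k + 1) 0 = trip.getD (k + 1) 0 := by
      rw [zero_add]
      have : ((k : Int) + 1) = ((k + 1 : Nat) : Int) := by push_cast; ring
      rw [this, PySem.List.pyGetD_natCast]
    simp only [h1, h2, Prod.mk.injEq]
  rw [PySem.List.foldl_congr_mem _ _ _ _ hbody]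
  have hrng : ((trip.length : Int) - 1 - 0).toNat = trip.length - 1 := by omega
  rw [hrng]
  have h2 := List.foldl_map
    (f := fun k : Nat => (trip.getD k 0, trip.getD (k + 1) 0))
    (g := fun (a : List Int) (x : Int × Int) =>
      if x = (PySem.List.pyGetD fp 0 0, PySem.List.pyGetD fp 1 0) then a ++ fp else a)
    (l := List.range (trip.length - 1)) (init := acc)
  rw [← h2, pv_pairs_map, pv_loop_count]

-- both fpTrip accumulators coincide
theorem pv_core (trip : List Int) (fps : List (List Int)) :
    (fps.foldl (fun acc fp =>
      (PySem.List.pyRange 0 ((trip.length : Int) - 1) 1).foldl (fun acc2 i =>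
        if PySem.List.pyGetD trip i 0 = PySem.List.pyGetD fp 0 0 ∧
           PySem.List.pyGetD trip (i + 1) 0 = PySem.List.pyGetD fp 1 0 then
          acc2 ++ fp
        else acc2) acc) [])
      = fps.foldl (fun acc fp =>
          acc ++ PySem.List.pyRepeat fp
            ((pvPairs trip).count (PySem.List.pyGetD fp 0 0, PySem.List.pyGetD fp 1 0))) [] := by
  apply PySem.List.foldl_congr_mem
  intro a fp _
  exact pv_inner trip fp a

-- B's dict lookup is the pair count
theorem pv_counts (trip : List Int) (key : Int × Int) :
    ((trip.zip (trip.drop 1)).foldl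
      (fun d p => d.insert p (d.getD p 0 + 1)) PySem.Dict.empty).getD key 0
      = ((pvPairs trip).count key : Int) := by
  rw [PySem.Dict.foldl_insert_getD_add_one_eq_counter, PySem.Dict.getD_counter]
  rfl

theorem pv_pairs_nil (trip : List Int) (h : trip.length < 2) : pvPairs trip = [] := by
  match trip, h with
  | [], _ => rfl
  | [x], _ => rfl

-- ===== VERDICT (by name: the statement is the Claim_ definition above) =====
theorem TransferToFPTrip_spec : Claim_equal_TransferToFPTrip := by
  intro trip fps _ _
  unfold Spec_TransferToFPTrip TransferToFPTrip TransferToFPTrip_alt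
  simp only [pv_core]
  by_cases h : trip.length < 2
  · rw [if_pos h]
    have : fps.foldl (fun acc fp =>
        acc ++ PySem.List.pyRepeat fp
          ((pvPairs trip).count (PySem.List.pyGetD fp 0 0, PySem.List.pyGetD fp 1 0))) []
        = [] := by
      rw [pv_pairs_nil trip h]
      induction fps with
      | nil => rfl
      | cons fp fps ih => simp [PySem.List.pyRepeat]
    simp [this]
  · rw [if_neg h]
    have hc : ∀ fp : List Int,
        ((trip.zip (trip.drop 1)).foldl
          (fun d p => d.insert p (d.getD p 0 + 1)) PySem.Dict.empty).getD
            (PySem.List.pyGetD fp 0 0, PySem.List.pyGetD fp 1 0) 0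
        = ((pvPairs trip).count (PySem.List.pyGetD fp 0 0, PySem.List.pyGetD fp 1 0) : Int) :=
      fun fp => pv_counts trip _
    simp only [hc]
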